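-- pv_equiv track=rewrite | github.com/theabbie/leetcode | miscellaneous/Concat_Palindrome.py | solve
-- ===== SOURCE A (Python) =====
-- from collections import Counter
--
-- def solve(a, b):
--     if len(b) < len(a):
--         a, b = b, a
--     ctra = Counter(a)
--     ctrb = Counter(b)
--     for c in ctra:
--         ctrb[c] -= ctra[c]
--         if ctrb[c] < 0:
--             return "NO"
--     odd = 0
--     for c in ctrb:
--         if ctrb[c] & 1:
--             odd += 1
--     if odd > 1:
--         return "NO"
--     return "YES"
-- ===== SOURCE B (Python) =====
-- def solve(a, b):
--     if len(b) < len(a):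
--         a, b = b, a
--     sa = sorted(a)
--     sb = sorted(b)
--     leftover = []
--     i = 0
--     for c in sb:
--         if i < len(sa) and sa[i] == c:
--             i += 1
--         else:
--             leftover.append(c)
--     if i < len(sa):
--         return "NO"
--     odd = sum(leftover.count(c) % 2 for c in dict.fromkeys(leftover))
--     return "NO" if odd > 1 else "YES"
-- ===== Notes on version B (the rewrite author's own statement) =====
-- stated objective: alternative
-- what changed: Replaces A's Counter construction and dict-subtraction loop by sorting both strings, matching the shorter against the longer with a two-pointer scan, and tallying the parity of the leftover characters via dedup-and-count.
import Mathlib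
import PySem

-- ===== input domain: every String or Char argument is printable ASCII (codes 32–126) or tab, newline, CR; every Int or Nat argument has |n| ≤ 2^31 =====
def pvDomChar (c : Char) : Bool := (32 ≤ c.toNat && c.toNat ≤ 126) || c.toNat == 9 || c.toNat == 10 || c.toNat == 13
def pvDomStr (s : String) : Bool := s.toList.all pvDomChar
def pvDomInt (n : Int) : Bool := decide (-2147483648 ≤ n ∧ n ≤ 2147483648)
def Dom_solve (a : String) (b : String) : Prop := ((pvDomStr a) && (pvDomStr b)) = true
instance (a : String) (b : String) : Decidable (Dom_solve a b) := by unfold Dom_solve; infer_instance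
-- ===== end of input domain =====

-- B replaces A's Counter-subtraction dict loop by a two-pointer match over the two sorted
-- strings plus a dedup-and-count parity tally of the leftover characters (objective: alternative).


-- ===== PORT A =====
-- 'for c in ctra: ctrb[c] -= ctra[c]; if ctrb[c] < 0: return "NO"' — the early return as Option
def solveLoop (ca : PySem.Dict Char Int) : List Char → PySem.Dict Char Int → Option (PySem.Dict Char Int)
  | [], cb => some cb
  | c :: cs, cb =>
    let cb' := cb.insert c (cb.getD c 0 - ca.getD c 0)
    if cb'.getD c 0 < 0 then none
    else solveLoop ca cs cb'

-- A's body after the 'if len(b) < len(a)' swap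
def solveCore (a : String) (b : String) : String :=
  let ctra := PySem.Dict.counter a.toList
  let ctrb := PySem.Dict.counter b.toList
  match solveLoop ctra ctra.keys ctrb with
  | none => "NO"
  | some d =>
      let odd := d.keys.foldl (fun (n : Int) c => if PySem.Int.band (d.getD c 0) 1 ≠ 0 then n + 1 else n) 0
      if 1 < odd then "NO" else "YES"

def solve (a : String) (b : String) : String :=
  if PySem.Str.len b < PySem.Str.len a then solveCore b a else solveCore a b

-- ===== PORT B =====
-- B's body after the same swap: two-pointer match over the sorted strings (sa[i] is guarded by
-- i < len(sa), so the total getD with a dummy default is exact), then the parity tally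
def solveAltCore (a : String) (b : String) : String :=
  let sa := PySem.List.sorted a.toList (fun c => c) false
  let sb := PySem.List.sorted b.toList (fun c => c) false
  let st := sb.foldl
      (fun (st : List Char × Nat) c =>
        if st.2 < sa.length ∧ sa.getD st.2 ' ' = c then (st.1, st.2 + 1)
        else (st.1 ++ [c], st.2))
      ([], 0)
  if st.2 < sa.length then "NO"
  else
    let odd := ((PySem.List.dedup st.1).map (fun c => st.1.count c % 2)).sum
    if odd > 1 then "NO" else "YES"

def solve_alt (a : String) (b : String) : String :=
  if PySem.Str.len b < PySem.Str.len a then solveAltCore b a else solveAltCore a b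

-- ===== PRECONDITION & SPEC =====
def Spec_solve (a : String) (b : String) (out : String) : Prop := out = solve_alt a b
instance (a : String) (b : String) (out : String) : Decidable (Spec_solve a b out) := by unfold Spec_solve; infer_instance

-- ===== CLAIM (what is proved, stated in full; the proofs are below) =====
def Claim_equal_solve : Prop := ∀ (a : String) (b : String), Dom_solve a b → Spec_solve a b (solve a b)

-- ===== LEMMAS AND PROOFS =====

-- the common reference value both cores compute: "NO" unless b's multiset contains a's,
-- and at most one character of the leftover multiset has an odd count
def refValue (la lb : List Char) : String :=
  if ∀ c : Char, la.count c ≤ lb.count c then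
    (if 1 < ((PySem.Set.ofList lb).countP (fun c => (lb.count c - la.count c) % 2 = 1) : Int)
     then "NO" else "YES")
  else "NO"

-- greedy matching of a sorted pattern against a sorted source, consuming the source front-to-back
def greedy : List Char → List Char → List Char × List Char
  | p, [] => ([], p)
  | [], c :: s => let r := greedy [] s; (c :: r.1, [])
  | d :: p', c :: s =>
      if d = c then greedy p' s
      else let r := greedy (d :: p') s; (c :: r.1, r.2)


-- ---- A-side lemmas ----

theorem solveLoop_eq_none_iff (ca : PySem.Dict Char Int) :
    ∀ (cs : List Char), cs.Nodup → ∀ cb : PySem.Dict Char Int,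
      (solveLoop ca cs cb = none ↔ ∃ c ∈ cs, cb.getD c 0 < ca.getD c 0) := by
  intro cs
  induction cs with
  | nil => intro _ cb; simp [solveLoop]
  | cons c cs ih =>
    intro hnd cb
    obtain ⟨hc, hnd'⟩ := List.nodup_cons.mp hnd
    simp only [solveLoop, PySem.Dict.getD_insert_self]
    split
    · rename_i h
      simp only [true_iff]
      exact ⟨c, by simp, by omega⟩
    · rename_i h
      rw [ih hnd']
      constructor
      · rintro ⟨x, hx, hlt⟩
        refine ⟨x, by simp [hx], ?_⟩
        rwa [PySem.Dict.getD_insert_of_ne _ _ _ (by rintro rfl; exact hc hx)] at hlt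
      · rintro ⟨x, hx, hlt⟩
        rcases List.mem_cons.mp hx with rfl | hx'
        · omega
        · exact ⟨x, hx', by rwa [PySem.Dict.getD_insert_of_ne _ _ _ (by rintro rfl; exact hc hx')]⟩

theorem solveLoop_some (ca : PySem.Dict Char Int) :
    ∀ (cs : List Char), cs.Nodup → ∀ cb : PySem.Dict Char Int,
      (∀ c ∈ cs, ca.getD c 0 ≤ cb.getD c 0) →
      (∀ c ∈ cs, cb.contains c = true) →
      ∃ d, solveLoop ca cs cb = some d ∧ d.keys = cb.keys ∧
        (∀ x, d.getD x 0 = cb.getD x 0 - (if x ∈ cs then ca.getD x 0 else 0)) := by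
  intro cs
  induction cs with
  | nil => intro _ cb _ _; exact ⟨cb, rfl, rfl, by simp⟩
  | cons c cs ih =>
    intro hnd cb hle hcont
    obtain ⟨hc, hnd'⟩ := List.nodup_cons.mp hnd
    have hle_c : ca.getD c 0 ≤ cb.getD c 0 := hle c (by simp)
    obtain ⟨d, hd, hkeys, hgetD⟩ := ih hnd' (cb.insert c (cb.getD c 0 - ca.getD c 0))
      (fun x hx => by
        rw [PySem.Dict.getD_insert_of_ne _ _ _ (by rintro rfl; exact hc hx)]
        exact hle x (by simp [hx]))
      (fun x hx => by
        rw [PySem.Dict.contains_insert]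
        simp [hcont x (by simp [hx])])
    refine ⟨d, ?_, ?_, ?_⟩
    · simp only [solveLoop, PySem.Dict.getD_insert_self]
      rw [if_neg (by omega)]
      exact hd
    · rw [hkeys, PySem.Dict.keys_insert_of_contains _ _ (hcont c (by simp))]
    · intro x
      rw [hgetD x]
      by_cases hxc : x = c
      · subst hxc
        rw [PySem.Dict.getD_insert_self, if_neg hc, if_pos (by simp)]
        omega
      · rw [PySem.Dict.getD_insert_of_ne _ _ _ hxc]
        by_cases hx : x ∈ cs <;> simp [hx, hxc]

theorem band_one_ne_zero_iff (m : Nat) : (PySem.Int.band (m : Int) 1 ≠ 0) ↔ m % 2 = 1 := by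
  have h1 : ((1 : Int)) = ((1 : Nat) : Int) := by norm_num
  rw [h1, PySem.Int.band_natCast, Nat.and_one_is_mod]
  omega

theorem solveCore_eq_refValue (a b : String) :
    solveCore a b = refValue a.toList b.toList := by
  have hnd : (PySem.Dict.counter a.toList).keys.Nodup := by
    rw [PySem.Dict.keys_counter]; exact PySem.Set.nodup_ofList a.toList
  by_cases hcf : ∀ c : Char, a.toList.count c ≤ b.toList.count c
  · obtain ⟨d, hd, hkeys, hgetD⟩ := solveLoop_some (PySem.Dict.counter a.toList) _ hnd
      (PySem.Dict.counter b.toList)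
      (fun c _ => by
        rw [PySem.Dict.getD_counter, PySem.Dict.getD_counter]
        exact_mod_cast hcf c)
      (fun c hc => by
        rw [PySem.Dict.contains_counter]
        have hca : c ∈ a.toList := by
          rw [PySem.Dict.keys_counter] at hc; exact (PySem.Set.mem_ofList _ _).mp hc
        have : 0 < b.toList.count c := lt_of_lt_of_le (List.count_pos_iff.mpr hca) (hcf c)
        simp [List.count_pos_iff.mp this])
    have hdval : ∀ c : Char, d.getD c 0 = ((b.toList.count c - a.toList.count c : Nat) : Int) := by
      intro c
      rw [hgetD c, PySem.Dict.getD_counter, PySem.Dict.keys_counter, PySem.Dict.getD_counter]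
      by_cases hca : c ∈ a.toList
      · rw [if_pos ((PySem.Set.mem_ofList _ _).mpr hca)]
        have := hcf c; omega
      · rw [if_neg (fun h => hca ((PySem.Set.mem_ofList _ _).mp h))]
        rw [List.count_eq_zero_of_not_mem hca]
        omega
    simp only [solveCore]
    rw [hd]
    dsimp only
    rw [PySem.List.foldl_ite_add_one, hkeys, PySem.Dict.keys_counter, refValue, if_pos hcf]
    have hct : List.countP (fun c => decide (PySem.Int.band (d.getD c 0) 1 ≠ 0)) (PySem.Set.ofList b.toList)
             = List.countP (fun c => decide ((List.count c b.toList - List.count c a.toList) % 2 = 1)) (PySem.Set.ofList b.toList) := by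
      apply List.countP_congr
      intro c _
      rw [hdval c]
      simp only [decide_eq_true_eq]
      exact band_one_ne_zero_iff _
    rw [hct]
    norm_num
  · simp only [solveCore]
    rw [(solveLoop_eq_none_iff _ _ hnd _).mpr ?_, refValue, if_neg hcf]
    push Not at hcf
    obtain ⟨c, hc⟩ := hcf
    refine ⟨c, ?_, ?_⟩
    · rw [PySem.Dict.keys_counter]
      exact (PySem.Set.mem_ofList _ _).mpr (List.count_pos_iff.mp (by omega))
    · rw [PySem.Dict.getD_counter, PySem.Dict.getD_counter]
      exact_mod_cast hc

-- ---- B-side lemmas ----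

theorem greedy_src_nil (p : List Char) : greedy p [] = ([], p) := by
  cases p <;> simp [greedy]

theorem greedy_pat_nil (c : Char) (s : List Char) :
    greedy [] (c :: s) = (c :: (greedy [] s).1, []) := by simp [greedy]

theorem greedy_match (d : Char) (p' s : List Char) :
    greedy (d :: p') (d :: s) = greedy p' s := by simp [greedy]

theorem greedy_skip (d c : Char) (p' s : List Char) (h : d ≠ c) :
    greedy (d :: p') (c :: s) = (c :: (greedy (d :: p') s).1, (greedy (d :: p') s).2) := by
  simp [greedy, h]

theorem greedy_nil_snd : ∀ s : List Char, (greedy [] s).2 = [] := by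
  intro s; cases s <;> simp [greedy]

theorem foldl_merge_eq_greedy (sa : List Char) (sb : List Char) :
    ∀ (acc : List Char) (i : Nat), i ≤ sa.length →
      sb.foldl
        (fun (st : List Char × Nat) c =>
          if st.2 < sa.length ∧ sa.getD st.2 ' ' = c then (st.1, st.2 + 1)
          else (st.1 ++ [c], st.2))
        (acc, i)
      = (acc ++ (greedy (sa.drop i) sb).1, sa.length - (greedy (sa.drop i) sb).2.length) := by
  induction sb with
  | nil =>
    intro acc i hi
    simp [greedy_src_nil, List.length_drop]
    omega
  | cons c sb ih =>
    intro acc i hi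
    rw [List.foldl_cons]
    by_cases h : i < sa.length ∧ sa.getD i ' ' = c
    · rw [if_pos h]
      obtain ⟨h1, h2⟩ := h
      rw [ih acc (i + 1) (by omega)]
      have hdrop : sa.drop i = c :: sa.drop (i + 1) := by
        rw [List.drop_eq_getElem_cons h1]
        congr 1
        rw [← h2, List.getD_eq_getElem _ _ h1]
      rw [hdrop, greedy_match]
    · rw [if_neg h]
      rw [ih (acc ++ [c]) i hi]
      by_cases hlen : i < sa.length
      · have hne : sa.getD i ' ' ≠ c := fun hc => h ⟨hlen, hc⟩
        have hne' : sa[i] ≠ c := by rwa [List.getD_eq_getElem _ _ hlen] at hne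
        rw [List.drop_eq_getElem_cons hlen, greedy_skip _ _ _ _ hne',
          ← List.drop_eq_getElem_cons hlen]
        simp
      · have hle : sa.length ≤ i := by omega
        rw [List.drop_eq_nil_of_le hle, greedy_pat_nil]
        simp [greedy_nil_snd]

theorem count_le_zero_eq_nil (p : List Char) (h : ∀ c, p.count c ≤ 0) : p = [] := by
  cases p with
  | nil => rfl
  | cons d p' => have := h d; simp at this

theorem greedy_snd_nil_iff (s : List Char) :
    ∀ p : List Char, p.Pairwise (· ≤ ·) → s.Pairwise (· ≤ ·) →
      ((greedy p s).2 = [] ↔ ∀ c, p.count c ≤ s.count c) := by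
  induction s with
  | nil =>
    intro p _ _
    rw [greedy_src_nil]
    constructor
    · rintro rfl; simp
    · intro h; exact count_le_zero_eq_nil p (fun c => by simpa using h c)
  | cons c s ih =>
    intro p hp hs
    have hs1 : ∀ x ∈ s, c ≤ x := (List.pairwise_cons.mp hs).1
    have hs2 : s.Pairwise (· ≤ ·) := (List.pairwise_cons.mp hs).2
    cases p with
    | nil => simp [greedy_pat_nil]
    | cons d p' =>
      have hp1 : ∀ x ∈ p', d ≤ x := (List.pairwise_cons.mp hp).1
      have hp2 : p'.Pairwise (· ≤ ·) := (List.pairwise_cons.mp hp).2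
      by_cases hdc : d = c
      · subst hdc
        rw [greedy_match, ih p' hp2 hs2]
        constructor
        · intro h x
          by_cases hx : x = d
          · subst hx
            rw [List.count_cons_self, List.count_cons_self]
            have := h x; omega
          · rw [List.count_cons_of_ne (Ne.symm hx), List.count_cons_of_ne (Ne.symm hx)]
            exact h x
        · intro h x
          by_cases hx : x = d
          · subst hx
            have := h x
            rw [List.count_cons_self, List.count_cons_self] at this
            omega
          · have := h x
            rwa [List.count_cons_of_ne (Ne.symm hx), List.count_cons_of_ne (Ne.symm hx)] at this
      · rw [greedy_skip _ _ _ _ hdc]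
        rw [show ((c :: (greedy (d :: p') s).1, (greedy (d :: p') s).2) : List Char × List Char).2
            = (greedy (d :: p') s).2 from rfl]
        rw [ih (d :: p') hp hs2]
        rcases lt_trichotomy c d with hlt | heq | hgt
        · -- c < d : c does not occur in d :: p'
          have hcp : (d :: p').count c = 0 := by
            rw [List.count_eq_zero]
            intro hmem
            rcases List.mem_cons.mp hmem with rfl | hmem'
            · exact lt_irrefl _ hlt
            · exact absurd hlt (not_lt.mpr (hp1 _ hmem'))
          constructor
          · intro h x
            by_cases hx : x = c
            · subst hx; rw [hcp]; exact Nat.zero_le _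
            · rw [List.count_cons_of_ne (Ne.symm hx)]; exact h x
          · intro h x
            by_cases hx : x = c
            · subst hx; rw [hcp]; exact Nat.zero_le _
            · have := h x
              rwa [List.count_cons_of_ne (Ne.symm hx)] at this
        · exact absurd heq (fun e => hdc e.symm)
        · -- d < c : d occurs in the pattern but not in c :: s
          have hds : s.count d = 0 := by
            rw [List.count_eq_zero]
            intro hmem
            exact absurd hgt (not_lt.mpr (hs1 _ hmem))
          apply iff_of_false <;> intro h
          · have := h d
            rw [hds, List.count_cons_self] at this
            omega
          · have := h d
            rw [List.count_cons_self, List.count_cons_of_ne (fun e => hdc e.symm) , hds] at this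
            omega

theorem greedy_fst_count (s : List Char) :
    ∀ p : List Char, p.Pairwise (· ≤ ·) → s.Pairwise (· ≤ ·) →
      (∀ c, p.count c ≤ s.count c) →
      ∀ c, (greedy p s).1.count c = s.count c - p.count c := by
  induction s with
  | nil =>
    intro p _ _ hle c
    have : p = [] := count_le_zero_eq_nil p (fun c => by simpa using hle c)
    subst this
    rw [greedy_src_nil]
    simp
  | cons c s ih =>
    intro p hp hs hle x
    have hs1 : ∀ y ∈ s, c ≤ y := (List.pairwise_cons.mp hs).1
    have hs2 : s.Pairwise (· ≤ ·) := (List.pairwise_cons.mp hs).2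
    cases p with
    | nil =>
      rw [greedy_pat_nil]
      dsimp only
      have := ih [] List.Pairwise.nil hs2 (by simp) x
      by_cases hx : x = c
      · subst hx
        rw [List.count_cons_self, List.count_cons_self, this]
        simp
      · rw [List.count_cons_of_ne (Ne.symm hx), List.count_cons_of_ne (Ne.symm hx), this]
    | cons d p' =>
      have hp1 : ∀ y ∈ p', d ≤ y := (List.pairwise_cons.mp hp).1
      have hp2 : p'.Pairwise (· ≤ ·) := (List.pairwise_cons.mp hp).2
      by_cases hdc : d = c
      · subst hdc
        rw [greedy_match]
        have hle' : ∀ y, p'.count y ≤ s.count y := by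
          intro y
          have := hle y
          by_cases hy : y = d
          · subst hy
            rw [List.count_cons_self, List.count_cons_self] at this
            omega
          · rwa [List.count_cons_of_ne (Ne.symm hy), List.count_cons_of_ne (Ne.symm hy)] at this
        have := ih p' hp2 hs2 hle' x
        by_cases hx : x = d
        · subst hx
          rw [List.count_cons_self, List.count_cons_self, this]
          have := hle' x
          omega
        · rw [List.count_cons_of_ne (Ne.symm hx), List.count_cons_of_ne (Ne.symm hx)]
          exact this
      · -- hle rules out d < c, so c < d and c ∉ d :: p'
        have hcd : c < d := by
          rcases lt_trichotomy c d with h' | h' | h'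
          · exact h'
          · exact absurd h' (fun e => hdc e.symm)
          · exfalso
            have hds : s.count d = 0 := by
              rw [List.count_eq_zero]
              intro hmem
              exact absurd h' (not_lt.mpr (hs1 _ hmem))
            have := hle d
            rw [List.count_cons_self, List.count_cons_of_ne (fun e => hdc e.symm), hds] at this
            omega
        have hcp : (d :: p').count c = 0 := by
          rw [List.count_eq_zero]
          intro hmem
          rcases List.mem_cons.mp hmem with rfl | hmem'
          · exact lt_irrefl _ hcd
          · exact absurd hcd (not_lt.mpr (hp1 _ hmem'))
        have hle' : ∀ y, (d :: p').count y ≤ s.count y := by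
          intro y
          have := hle y
          by_cases hy : y = c
          · subst hy; rw [hcp]; omega
          · rwa [List.count_cons_of_ne (Ne.symm hy)] at this
        rw [greedy_skip _ _ _ _ hdc]
        rw [show ((c :: (greedy (d :: p') s).1, (greedy (d :: p') s).2) : List Char × List Char).1
            = c :: (greedy (d :: p') s).1 from rfl]
        have := ih (d :: p') hp hs2 hle' x
        by_cases hx : x = c
        · subst hx
          rw [List.count_cons_self, List.count_cons_self, this, hcp]
          have := hle' x
          omega
        · rw [List.count_cons_of_ne (Ne.symm hx), List.count_cons_of_ne (Ne.symm hx)]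
          exact this

theorem sum_map_count_mod_two (l : List Char) (g : Char → Nat) :
    (l.map (fun c => g c % 2)).sum = l.countP (fun c => g c % 2 = 1) := by
  induction l with
  | nil => simp
  | cons c l ih =>
    rw [List.map_cons, List.sum_cons, List.countP_cons, ih]
    by_cases h : g c % 2 = 1 <;> simp [h] <;> omega

theorem countP_nodup_eq (S1 S2 : List Char) (h1 : S1.Nodup) (h2 : S2.Nodup)
    (P : Char → Bool) (hm : ∀ c, P c = true → (c ∈ S1 ↔ c ∈ S2)) :
    S1.countP P = S2.countP P := by
  rw [List.countP_eq_length_filter, List.countP_eq_length_filter]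
  apply List.Perm.length_eq
  rw [List.perm_ext_iff_of_nodup (h1.filter P) (h2.filter P)]
  intro x
  simp only [List.mem_filter]
  constructor
  · rintro ⟨hx, hp⟩; exact ⟨(hm x hp).mp hx, hp⟩
  · rintro ⟨hx, hp⟩; exact ⟨(hm x hp).mpr hx, hp⟩

theorem solveAltCore_eq_refValue (a b : String) :
    solveAltCore a b = refValue a.toList b.toList := by
  simp only [solveAltCore]
  have hpa : (PySem.List.sorted a.toList (fun c => c) false).Pairwise (· ≤ ·) := by
    simpa using PySem.List.sorted_pairwise a.toList (fun c => c)
  have hpb : (PySem.List.sorted b.toList (fun c => c) false).Pairwise (· ≤ ·) := by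
    simpa using PySem.List.sorted_pairwise b.toList (fun c => c)
  have hca : ∀ x, (PySem.List.sorted a.toList (fun c => c) false).count x = a.toList.count x :=
    fun x => (PySem.List.sorted_perm a.toList (fun c => c) false).count_eq x
  have hcb : ∀ x, (PySem.List.sorted b.toList (fun c => c) false).count x = b.toList.count x :=
    fun x => (PySem.List.sorted_perm b.toList (fun c => c) false).count_eq x
  set sa := PySem.List.sorted a.toList (fun c => c) false
  set sb := PySem.List.sorted b.toList (fun c => c) false
  rw [foldl_merge_eq_greedy sa sb [] 0 (Nat.zero_le _)]
  rw [List.drop_zero, List.nil_append]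
  by_cases hcf : ∀ c : Char, a.toList.count c ≤ b.toList.count c
  · have hcf' : ∀ c, sa.count c ≤ sb.count c := fun c => by rw [hca, hcb]; exact hcf c
    have hR : (greedy sa sb).2 = [] := (greedy_snd_nil_iff sb sa hpa hpb).mpr hcf'
    rw [hR]
    simp only [List.length_nil, Nat.sub_zero, lt_irrefl, if_false]
    have hL : ∀ c, (greedy sa sb).1.count c = b.toList.count c - a.toList.count c := by
      intro c
      rw [greedy_fst_count sb sa hpa hpb hcf' c, hca, hcb]
    rw [PySem.List.dedup_eq_ofList, sum_map_count_mod_two]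
    have hstep1 : (PySem.Set.ofList (greedy sa sb).1).countP
          (fun c => decide ((greedy sa sb).1.count c % 2 = 1))
        = (PySem.Set.ofList (greedy sa sb).1).countP
          (fun c => decide ((b.toList.count c - a.toList.count c) % 2 = 1)) := by
      apply List.countP_congr
      intro c _
      simp only [decide_eq_true_eq, hL c]
    have hstep2 : (PySem.Set.ofList (greedy sa sb).1).countP
          (fun c => decide ((b.toList.count c - a.toList.count c) % 2 = 1))
        = (PySem.Set.ofList b.toList).countP
          (fun c => decide ((b.toList.count c - a.toList.count c) % 2 = 1)) := by
      apply countP_nodup_eq _ _ (PySem.Set.nodup_ofList _) (PySem.Set.nodup_ofList _)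
      intro c hP
      simp only [decide_eq_true_eq] at hP
      have hpos : 0 < b.toList.count c - a.toList.count c := by omega
      rw [PySem.Set.mem_ofList, PySem.Set.mem_ofList]
      constructor
      · intro _
        exact List.count_pos_iff.mp (by omega)
      · intro _
        exact List.count_pos_iff.mp (by rw [hL c]; omega)
    rw [hstep1, hstep2, refValue, if_pos hcf]
    have hcast : (1 < ((PySem.Set.ofList b.toList).countP
        (fun c => decide ((b.toList.count c - a.toList.count c) % 2 = 1)) : Int))
        ↔ 1 < (PySem.Set.ofList b.toList).countP
            (fun c => decide ((b.toList.count c - a.toList.count c) % 2 = 1)) := by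
      exact_mod_cast Iff.rfl
    by_cases hgt : 1 < (PySem.Set.ofList b.toList).countP
        (fun c => decide ((b.toList.count c - a.toList.count c) % 2 = 1))
    · rw [if_pos hgt, if_pos (hcast.mpr hgt)]
    · rw [if_neg hgt, if_neg (fun h => hgt (hcast.mp h))]
  · have hcf' : ¬ ∀ c, sa.count c ≤ sb.count c := by
      intro h; exact hcf (fun c => by rw [← hca, ← hcb]; exact h c)
    have hRne : (greedy sa sb).2 ≠ [] := by
      intro h; exact hcf' ((greedy_snd_nil_iff sb sa hpa hpb).mp h)
    have hsane : sa ≠ [] := by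
      intro h
      apply hRne
      rw [h]
      exact greedy_nil_snd sb
    have h1 : 0 < (greedy sa sb).2.length := List.length_pos_of_ne_nil hRne
    have h2 : 0 < sa.length := List.length_pos_of_ne_nil hsane
    rw [if_pos (by omega), refValue, if_neg hcf]

-- ===== VERDICT (by name: the statement is the Claim_ definition above) =====
theorem solve_spec : Claim_equal_solve := by
  intro a b _
  unfold Spec_solve solve solve_alt
  split <;> rw [solveCore_eq_refValue, solveAltCore_eq_refValue]
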